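-- pv_equiv track=rewrite | github.com/Xinyu0423/CSCI-3104 | hashFunctions.py | sumString
-- ===== SOURCE A (Python) =====
-- def sumString(str):
--     sum=0;
--     listChar=["A", "B","C","D","E","F","G","H","I","J","K","L","M","N","O","P","Q","R","S","T","U","V","W","X","Y","Z"];
--     costChar=[]
--     for i in range(1,27):
--         costChar.append(i)
--     # create a tempary list and store each cost in the cost char
--     #correspond to each characters
--     for i in range(len(str)):
--         for j in range(len(listChar)):
--             if(str[i]==listChar[j]):
--                 sum=sum+costChar[j]
--     #calculate the sum
--     return sum
-- ===== SOURCE B (Python) =====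
-- def sumString(str):
--     return sum(ord(c) - 64 for c in str if 'A' <= c <= 'Z')
-- ===== Notes on version B (the rewrite author's own statement) =====
-- stated objective: idiomatic
-- what changed: Replaces the 26-element alphabet/cost tables and the nested per-character alphabet scan with a single pass that computes each uppercase letter's value directly as ord(c)-64.
import Mathlib
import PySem

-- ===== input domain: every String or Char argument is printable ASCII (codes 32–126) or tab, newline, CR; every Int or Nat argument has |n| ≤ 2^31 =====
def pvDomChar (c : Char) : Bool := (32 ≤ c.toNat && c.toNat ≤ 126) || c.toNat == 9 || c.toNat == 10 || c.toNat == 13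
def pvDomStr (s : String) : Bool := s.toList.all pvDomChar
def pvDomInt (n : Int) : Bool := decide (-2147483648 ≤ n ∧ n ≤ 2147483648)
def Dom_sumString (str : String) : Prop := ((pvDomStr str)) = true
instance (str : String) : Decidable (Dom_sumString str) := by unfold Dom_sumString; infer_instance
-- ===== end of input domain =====

-- B replaces A's alphabet/cost tables and per-character alphabet scan with a single pass computing ord(c)-64 directly (idiomatic).

-- ===== PORT A =====
-- A's inner loop 'for j in range(len(listChar)): if str[i]==listChar[j]: sum+=costChar[j]'
-- walks the two equal-length tables in parallel, transliterated as a fold over their zip.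
def sumString (str : String) : Int :=
  let listChar : List Char :=
    ['A','B','C','D','E','F','G','H','I','J','K','L','M',
     'N','O','P','Q','R','S','T','U','V','W','X','Y','Z']
  let costChar : List Int := PySem.List.pyRange 1 27 1
  str.toList.foldl
    (fun sum c =>
      (listChar.zip costChar).foldl
        (fun s p => if c == p.1 then s + p.2 else s) sum)
    0

-- ===== PORT B =====
def sumString_alt (str : String) : Int :=
  str.toList.foldl
    (fun acc c => if 'A' ≤ c ∧ c ≤ 'Z' then acc + ((c.toNat : Int) - 64) else acc)
    0

-- ===== PRECONDITION & SPEC =====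
def Spec_sumString (str : String) (out : Int) : Prop := out = sumString_alt str
instance (str : String) (out : Int) : Decidable (Spec_sumString str out) := by unfold Spec_sumString; infer_instance

-- ===== CLAIM (what is proved, stated in full; the proofs are below) =====
def Claim_equal_sumString : Prop := ∀ (str : String), Dom_sumString str → Spec_sumString str (sumString str)

-- ===== LEMMAS AND PROOFS =====

lemma pvInRange (c : Char) : ('A' ≤ c ∧ c ≤ 'Z') ↔ (65 ≤ c.toNat ∧ c.toNat ≤ 90) := by
  simp only [Char.le_def, UInt32.le_iff_toNat_le, Char.toNat]
  exact Iff.rfl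

-- A fold whose guard never fires leaves the accumulator unchanged.
lemma pvFoldNone (c : Char) (l : List (Char × Int)) (a : Int)
    (h : ∀ p ∈ l, (c == p.1) = false) :
    l.foldl (fun s p => if c == p.1 then s + p.2 else s) a = a := by
  induction l generalizing a with
  | nil => rfl
  | cons p l ih =>
    simp only [List.foldl_cons, h p (List.mem_cons_self ..), Bool.false_eq_true, if_false]
    exact ih a (fun q hq => h q (List.mem_cons_of_mem _ hq))

-- A's per-character inner scan over the zipped tables equals B's direct arithmetic step.
lemma pvStep_eq (s : Int) (c : Char) :
    (((['A','B','C','D','E','F','G','H','I','J','K','L','M',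
        'N','O','P','Q','R','S','T','U','V','W','X','Y','Z'] : List Char).zip
          (PySem.List.pyRange 1 27 1)).foldl
        (fun s p => if c == p.1 then s + p.2 else s) s)
    = (if 'A' ≤ c ∧ c ≤ 'Z' then s + ((c.toNat : Int) - 64) else s) := by
  by_cases h : 65 ≤ c.toNat ∧ c.toNat ≤ 90
  · obtain ⟨h1, h2⟩ := h
    rw [if_pos ((pvInRange c).mpr ⟨h1, h2⟩)]
    rw [show c = Char.ofNat c.toNat from (Char.ofNat_toNat c).symm]
    generalize c.toNat = n at h1 h2 ⊢
    interval_cases n <;> simp [PySem.List.pyRange, List.range_succ]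
  · rw [if_neg (fun hh => h ((pvInRange c).mp hh))]
    have hall : ∀ p ∈ ((['A','B','C','D','E','F','G','H','I','J','K','L','M',
        'N','O','P','Q','R','S','T','U','V','W','X','Y','Z'] : List Char).zip
          (PySem.List.pyRange 1 27 1)), 65 ≤ p.1.toNat ∧ p.1.toNat ≤ 90 := by decide
    apply pvFoldNone
    intro p hp
    simp only [beq_eq_false_iff_ne]
    rintro rfl
    exact h (hall p hp)

lemma pvFold_eq (l : List Char) (s : Int) :
    l.foldl
      (fun sum c =>
        (((['A','B','C','D','E','F','G','H','I','J','K','L','M',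
            'N','O','P','Q','R','S','T','U','V','W','X','Y','Z'] : List Char).zip
              (PySem.List.pyRange 1 27 1)).foldl
            (fun s p => if c == p.1 then s + p.2 else s) sum)) s
    = l.foldl
        (fun acc c => if 'A' ≤ c ∧ c ≤ 'Z' then acc + ((c.toNat : Int) - 64) else acc) s := by
  simp only [pvStep_eq]

-- ===== VERDICT (by name: the statement is the Claim_ definition above) =====
theorem sumString_spec : Claim_equal_sumString := by
  intro str _
  unfold Spec_sumString sumString sumString_alt
  exact pvFold_eq str.toList 0
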